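-- pv_equiv track=rewrite | github.com/AdrianGabryla/pp1 | 05-Test1/mock/p5.py | f
-- ===== SOURCE A (Python) =====
-- def f(binary_number):
--     out = True
--     for i in binary_number:
--         if i == "1" or i == "0":
--             out = True
--         else:
--             return False
--     return out
-- ===== SOURCE B (Python) =====
-- def f(binary_number):
--     return set(binary_number) <= {"0", "1"}
-- ===== Notes on version B (the rewrite author's own statement) =====
-- stated objective: simpler
-- what changed: Replaces the per-character loop with a running flag and early return by building the set of distinct characters once and testing subset inclusion in the set of the two binary digits.
import Mathlib
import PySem

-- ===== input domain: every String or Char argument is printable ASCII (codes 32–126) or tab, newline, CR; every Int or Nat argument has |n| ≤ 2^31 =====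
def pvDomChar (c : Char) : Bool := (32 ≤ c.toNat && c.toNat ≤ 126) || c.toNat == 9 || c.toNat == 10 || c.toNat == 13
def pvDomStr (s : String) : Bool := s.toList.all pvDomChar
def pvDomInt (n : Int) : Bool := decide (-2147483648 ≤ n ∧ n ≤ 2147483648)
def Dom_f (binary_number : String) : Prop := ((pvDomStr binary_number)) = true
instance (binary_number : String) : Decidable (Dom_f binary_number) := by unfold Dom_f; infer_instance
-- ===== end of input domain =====

-- B replaces A's per-character loop/early-return with one set build plus a subset test (objective: simpler).

-- ===== PORT A =====
-- the for-loop with its early 'return False'; 'out' stays True throughout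
def fLoop : List Char → Bool
  | [] => true
  | c :: cs => if c = '1' ∨ c = '0' then fLoop cs else false

def f (binary_number : String) : Bool := fLoop binary_number.toList

-- ===== PORT B =====
def f_alt (binary_number : String) : Bool :=
  PySem.Set.issubset (PySem.Set.ofList binary_number.toList) (PySem.Set.ofList ['0', '1'])

-- ===== PRECONDITION & SPEC =====
def Spec_f (binary_number : String) (out : Bool) : Prop := out = f_alt binary_number
instance (binary_number : String) (out : Bool) : Decidable (Spec_f binary_number out) := by unfold Spec_f; infer_instance

-- ===== CLAIM (what is proved, stated in full; the proofs are below) =====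
def Claim_equal_f : Prop := ∀ (binary_number : String), Dom_f binary_number → Spec_f binary_number (f binary_number)

-- ===== LEMMAS AND PROOFS =====
theorem fLoop_eq_true_iff (l : List Char) : fLoop l = true ↔ ∀ c ∈ l, c = '1' ∨ c = '0' := by
  induction l with
  | nil => simp [fLoop]
  | cons c cs ih =>
    by_cases h : c = '1' ∨ c = '0' <;> simp [fLoop, h, ih]

theorem loop_eq_subset (l : List Char) :
    fLoop l = PySem.Set.issubset (PySem.Set.ofList l) (PySem.Set.ofList ['0', '1']) := by
  rcases hb : PySem.Set.issubset (PySem.Set.ofList l) (PySem.Set.ofList ['0', '1']) with _ | _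
  · rw [← Bool.not_eq_true] at hb ⊢
    intro hl
    apply hb
    rw [PySem.Set.issubset_iff]
    intro x hx
    rw [PySem.Set.mem_ofList] at hx
    have := (fLoop_eq_true_iff l).mp hl x hx
    rcases this with h | h <;> simp [h, PySem.Set.ofList]
  · rw [PySem.Set.issubset_iff] at hb
    rw [fLoop_eq_true_iff]
    intro c hc
    have := hb c (by rw [PySem.Set.mem_ofList]; exact hc)
    simp [PySem.Set.ofList] at this
    rcases this with h | h
    · right; exact h
    · left; exact h

-- ===== VERDICT (by name: the statement is the Claim_ definition above) =====
theorem f_spec : Claim_equal_f := by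
  intro s _
  unfold Spec_f f f_alt
  exact loop_eq_subset s.toList
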